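-- pv_equiv track=rewrite | github.com/Carlos-Jr/thermalbits | thermalbits/visualize_dag.py | _group_by_level
-- ===== SOURCE A (Python) =====
-- from collections import defaultdict
-- from collections.abc import Iterable, Sequence
--
-- def _group_by_level(
--     node_ids: Iterable[int],
--     level_by_id: dict[int, int],
-- ) -> list[tuple[int, list[int]]]:
--     grouped: dict[int, list[int]] = defaultdict(list)
--     for node_id in node_ids:
--         grouped[level_by_id[node_id]].append(node_id)
--     return [(level, sorted(grouped[level])) for level in sorted(grouped)]
-- ===== SOURCE B (Python) =====
-- from itertools import groupby
--
-- def _group_by_level(node_ids, level_by_id):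
--     ordered = sorted(node_ids, key=lambda nid: (level_by_id[nid], nid))
--     return [(level, list(group))
--             for level, group in groupby(ordered, key=lambda nid: level_by_id[nid])]
-- ===== Notes on version B (the rewrite author's own statement) =====
-- stated objective: idiomatic
-- what changed: Replaced the defaultdict bucketing plus per-bucket sort with a single sort by (level, id) followed by one linear itertools.groupby pass.
import Mathlib
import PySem

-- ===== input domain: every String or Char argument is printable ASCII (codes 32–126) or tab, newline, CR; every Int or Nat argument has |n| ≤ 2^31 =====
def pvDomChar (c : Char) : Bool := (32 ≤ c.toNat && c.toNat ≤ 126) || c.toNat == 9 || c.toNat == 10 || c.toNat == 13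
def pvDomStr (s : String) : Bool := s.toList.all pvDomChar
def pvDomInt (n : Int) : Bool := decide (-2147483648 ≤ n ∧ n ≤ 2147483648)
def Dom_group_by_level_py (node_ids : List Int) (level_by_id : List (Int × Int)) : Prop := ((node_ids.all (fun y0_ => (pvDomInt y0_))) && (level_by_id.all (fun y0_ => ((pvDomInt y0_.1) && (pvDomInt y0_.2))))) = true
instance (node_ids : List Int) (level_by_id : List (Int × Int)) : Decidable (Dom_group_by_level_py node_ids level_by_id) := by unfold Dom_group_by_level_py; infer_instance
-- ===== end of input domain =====

-- B replaces A's bucket-dict-then-sort-each-bucket structure with one sort by (level, id)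
-- followed by a single linear groupby pass (idiomatic; same asymptotic cost).
-- Pre_ excludes inputs where some node id is missing from level_by_id (Python KeyError in both versions).

-- ===== PORT A =====
-- defaultdict(list) bucketing loop, then sorted levels with each bucket sorted.
-- level_by_id[nid] would raise KeyError for a missing key; Pre_ excludes that, the port uses default 0 there.
def group_by_level_py (node_ids : List Int) (level_by_id : List (Int × Int)) : List (Int × List Int) :=
  let lid := PySem.Dict.mk level_by_id
  let grouped := node_ids.foldl
    (fun (g : PySem.Dict Int (List Int)) nid => g.modify (lid.getD nid 0) [] (· ++ [nid]))
    PySem.Dict.empty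
  (PySem.List.sorted grouped.keys (fun x => x)).map
    (fun level => (level, PySem.List.sorted (grouped.getD level []) (fun x => x)))

-- ===== PORT B =====
-- itertools.groupby over a list: maximal runs of equal key, each yielded with its key.
def groupRuns (key : Int → Int) : List Int → List (Int × List Int)
  | [] => []
  | x :: xs =>
    (key x, x :: xs.takeWhile (fun y => key y == key x)) ::
      groupRuns key (xs.dropWhile (fun y => key y == key x))
termination_by l => l.length
decreasing_by exact Nat.lt_succ_of_le (List.length_dropWhile_le _ _)

-- sort key 'lambda nid: (level_by_id[nid], nid)': a Python int pair compares lexicographically,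
-- which is exactly the order of Lex (Int × Int); KeyError again excluded by Pre_.
def group_by_level_py_alt (node_ids : List Int) (level_by_id : List (Int × Int)) : List (Int × List Int) :=
  let lid := PySem.Dict.mk level_by_id
  let ordered := PySem.List.sorted node_ids (fun nid => toLex (lid.getD nid 0, nid))
  groupRuns (fun nid => lid.getD nid 0) ordered

-- ===== PRECONDITION & SPEC =====
-- Pre_: every node id occurs as a key of level_by_id (otherwise the Python A raises KeyError).
def Pre_group_by_level_py (node_ids : List Int) (level_by_id : List (Int × Int)) : Prop :=
  ∀ nid ∈ node_ids, nid ∈ level_by_id.map Prod.fst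
instance (node_ids : List Int) (level_by_id : List (Int × Int)) : Decidable (Pre_group_by_level_py node_ids level_by_id) := by unfold Pre_group_by_level_py; infer_instance
def pvWitness_group_by_level_py : List Int × (List (Int × Int)) := ([3, 1, 2, 1], [(1, 0), (2, 1), (3, 0)])

def Spec_group_by_level_py (node_ids : List Int) (level_by_id : List (Int × Int)) (out : List (Int × List Int)) : Prop := out = group_by_level_py_alt node_ids level_by_id
instance (node_ids : List Int) (level_by_id : List (Int × Int)) (out : List (Int × List Int)) : Decidable (Spec_group_by_level_py node_ids level_by_id out) := by unfold Spec_group_by_level_py; infer_instance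

-- ===== CLAIM (what is proved, stated in full; the proofs are below) =====
def Claim_equal_group_by_level_py : Prop := ∀ (node_ids : List Int) (level_by_id : List (Int × Int)), Dom_group_by_level_py node_ids level_by_id → Pre_group_by_level_py node_ids level_by_id → Spec_group_by_level_py node_ids level_by_id (group_by_level_py node_ids level_by_id)

-- ===== LEMMAS AND PROOFS =====

-- The canonical value both ports compute, for an arbitrary key function f.
def pvCanon (f : Int → Int) (xs : List Int) : List (Int × List Int) :=
  (PySem.List.sorted (PySem.Set.ofList (xs.map f)) (fun x => x)).map
    (fun l => (l, PySem.List.sorted (xs.filter (fun n => f n == l)) (fun x => x)))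

-- ---- A side ----
theorem a_side (f : Int → Int) (xs : List Int) :
    (PySem.List.sorted
        (xs.foldl (fun (g : PySem.Dict Int (List Int)) nid => g.modify (f nid) [] (· ++ [nid])) PySem.Dict.empty).keys
        (fun x => x)).map
      (fun level => (level, PySem.List.sorted
        ((xs.foldl (fun (g : PySem.Dict Int (List Int)) nid => g.modify (f nid) [] (· ++ [nid])) PySem.Dict.empty).getD level [])
        (fun x => x)))
    = pvCanon f xs := by
  have hfold : ∀ (d : PySem.Dict Int (List Int)),
      xs.foldl (fun g nid => g.modify (f nid) [] (· ++ [nid])) d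
      = (xs.map (fun n => (f n, n))).foldl (fun d p => d.modify p.1 [] (· ++ [p.2])) d := by
    intro d; rw [List.foldl_map]
  have hkeys : (xs.foldl (fun (g : PySem.Dict Int (List Int)) nid => g.modify (f nid) [] (· ++ [nid])) PySem.Dict.empty).keys
      = PySem.Set.ofList (xs.map f) := by
    rw [PySem.Dict.keys_foldl_modify_key xs f [] (fun _ x => (· ++ [x]))]
    simp [PySem.Dict.keys_empty, PySem.Set.update, PySem.Set.ofList_eq_foldl]
  unfold pvCanon
  rw [hkeys]
  apply List.map_congr_left
  intro l _
  rw [hfold, PySem.Dict.getD_foldl_modify_append]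
  simp [PySem.Dict.getD_empty, List.filter_map, List.map_map, Function.comp_def]

-- ---- B side ----
theorem takeWhile_append_of_all {p : Int → Bool} {a : List Int} (b : List Int)
    (h : ∀ x ∈ a, p x = true) : (a ++ b).takeWhile p = a ++ b.takeWhile p := by
  induction a with
  | nil => simp
  | cons x t ih =>
    simp only [List.cons_append, List.takeWhile_cons, h x (by simp)]
    simp [ih (fun y hy => h y (by simp [hy]))]

theorem dropWhile_append_of_all {p : Int → Bool} {a : List Int} (b : List Int)
    (h : ∀ x ∈ a, p x = true) : (a ++ b).dropWhile p = b.dropWhile p := by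
  induction a with
  | nil => simp
  | cons x t ih =>
    simp only [List.cons_append, List.dropWhile_cons, h x (by simp)]
    simp [ih (fun y hy => h y (by simp [hy]))]

theorem groupRuns_run (f : Int → Int) (l : Int) (a b : List Int) (ha : a ≠ [])
    (hal : ∀ x ∈ a, f x = l) (hb : ∀ x ∈ b, f x ≠ l) :
    groupRuns f (a ++ b) = (l, a) :: groupRuns f b := by
  obtain ⟨x, a', rfl⟩ := List.exists_cons_of_ne_nil ha
  have hx : f x = l := hal x (by simp)
  have hall : ∀ y ∈ a', (fun y => f y == f x) y = true := fun y hy => by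
    simp [hal y (by simp [hy]), hx]
  have htb : b.takeWhile (fun y => f y == f x) = [] := by
    cases b with
    | nil => rfl
    | cons z t =>
      have : f z ≠ l := hb z (by simp)
      simp [hx, this]
  have hdb : b.dropWhile (fun y => f y == f x) = b := by
    cases b with
    | nil => rfl
    | cons z t =>
      have : f z ≠ l := hb z (by simp)
      simp [hx, this]
  rw [List.cons_append, groupRuns, takeWhile_append_of_all b hall,
      dropWhile_append_of_all b hall, htb, hdb, hx]
  simp

theorem groupRuns_flatMap (f : Int → Int) (L : List Int) (g : Int → List Int)
    (hne : ∀ l ∈ L, g l ≠ []) (hkey : ∀ l ∈ L, ∀ x ∈ g l, f x = l)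
    (hnd : L.Pairwise (· ≠ ·)) :
    groupRuns f (L.flatMap g) = L.map (fun l => (l, g l)) := by
  induction L with
  | nil => simp [groupRuns]
  | cons l L' ih =>
    rw [List.flatMap_cons, groupRuns_run f l (g l) (L'.flatMap g)
        (hne l (by simp)) (hkey l (by simp))
        (by
          intro x hx hxl
          obtain ⟨l', hl', hxg⟩ := List.mem_flatMap.mp hx
          exact (List.pairwise_cons.mp hnd).1 l' hl' (by rw [← hkey l' (by simp [hl']) x hxg, hxl])),
       List.map_cons]
    exact congrArg _ (ih (fun a ha => hne a (by simp [ha])) (fun a ha => hkey a (by simp [ha]))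
      (List.pairwise_cons.mp hnd).2)

theorem sum_map_ite {L : List Int} {v : Int} {c : Nat} {F : Int → Nat}
    (hnd : L.Pairwise (· ≠ ·)) (hv : v ∈ L)
    (hF : ∀ l ∈ L, F l = if l = v then c else 0) :
    (L.map F).sum = c := by
  induction L with
  | nil => cases hv
  | cons l L' ih =>
    rw [List.map_cons, List.sum_cons]
    rcases List.mem_cons.mp hv with rfl | hv'
    · rw [hF v (by simp), if_pos rfl]
      have h0 : (L'.map F).sum = 0 := by
        apply List.sum_eq_zero
        intro x hx
        obtain ⟨l', hl', rfl⟩ := List.mem_map.mp hx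
        rw [hF l' (by simp [hl']), if_neg (fun h => (List.pairwise_cons.mp hnd).1 l' hl' h.symm)]
      omega
    · rw [hF l (by simp), if_neg (fun h => (List.pairwise_cons.mp hnd).1 v hv' h)]
      simpa using ih (List.pairwise_cons.mp hnd).2 hv' (fun a ha => hF a (by simp [ha]))

theorem b_side (f : Int → Int) (xs : List Int) :
    groupRuns f (PySem.List.sorted xs (fun n => toLex (f n, n))) = pvCanon f xs := by
  set L := PySem.List.sorted (PySem.Set.ofList (xs.map f)) (fun x => x) with hLdef
  set g := fun l => PySem.List.sorted (xs.filter (fun n => f n == l)) (fun x => x) with hgdef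
  have hmemg : ∀ l x, x ∈ g l ↔ x ∈ xs ∧ f x = l := by
    intro l x
    rw [hgdef]
    simp [PySem.List.mem_sorted, List.mem_filter]
  have hmemL : ∀ l, l ∈ L ↔ ∃ n ∈ xs, f n = l := by
    intro l
    rw [hLdef]
    simp [PySem.List.mem_sorted, PySem.Set.mem_ofList, List.mem_map]
  have hLlt : L.Pairwise (· < ·) := PySem.List.sorted_ofList_pairwise_lt (xs.map f)
  have hperm : (L.flatMap g).Perm xs := by
    rw [List.perm_iff_count]
    intro a
    by_cases hax : a ∈ xs
    · have haL : f a ∈ L := (hmemL (f a)).mpr ⟨a, hax, rfl⟩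
      rw [List.count_flatMap]
      apply sum_map_ite (hLlt.imp ne_of_lt) haL
      intro l hl
      simp only [Function.comp_apply]
      by_cases h : l = f a
      · subst h
        rw [if_pos rfl, hgdef, (PySem.List.sorted_perm _ _ _).count_eq,
            List.count_filter (by simp)]
      · rw [if_neg h, List.count_eq_zero]
        intro hmem
        exact h (((hmemg l a).mp hmem).2.symm ▸ rfl)
    · rw [List.count_eq_zero.mpr hax, List.count_eq_zero]
      intro hmem
      obtain ⟨l, _, hg⟩ := List.mem_flatMap.mp hmem
      exact hax ((hmemg l a).mp hg).1
  have hsorted : PySem.List.sorted xs (fun n => toLex (f n, n)) = L.flatMap g := by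
    refine List.Perm.eq_of_pairwise ?_
      (PySem.List.sorted_pairwise xs (fun n => toLex (f n, n))) ?_ ?_
    · intro a b _ _ h1 h2
      have h3 := le_antisymm h1 h2
      simpa using congrArg (fun z => (ofLex z).2) h3
    · rw [List.pairwise_flatMap]
      constructor
      · intro l hl
        have hp : List.Pairwise (fun a b : Int => a ≤ b) (g l) :=
          PySem.List.sorted_pairwise (xs.filter (fun n => f n == l)) (fun x => x)
        refine hp.imp_of_mem ?_
        intro a b haM hbM hab
        rw [Prod.Lex.toLex_le_toLex]
        exact Or.inr ⟨by rw [((hmemg l a).mp haM).2, ((hmemg l b).mp hbM).2], hab⟩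
      · refine hLlt.imp ?_
        intro l1 l2 h x hx y hy
        rw [Prod.Lex.toLex_le_toLex]
        exact Or.inl (by rw [((hmemg l1 x).mp hx).2, ((hmemg l2 y).mp hy).2]; exact h)
    · exact (PySem.List.sorted_perm _ _ _).trans hperm.symm
  rw [hsorted, pvCanon]
  rw [← hLdef]
  refine groupRuns_flatMap f L g ?_ ?_ (hLlt.imp ne_of_lt)
  · intro l hl
    obtain ⟨n, hn, hf⟩ := (hmemL l).mp hl
    exact List.ne_nil_of_mem ((hmemg l n).mpr ⟨hn, hf⟩)
  · intro l _ x hx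
    exact ((hmemg l x).mp hx).2

-- ===== VERDICT (by name: the statement is the Claim_ definition above) =====
theorem group_by_level_py_spec : Claim_equal_group_by_level_py := by
  intro node_ids level_by_id _ _
  unfold Spec_group_by_level_py group_by_level_py group_by_level_py_alt
  rw [a_side ((PySem.Dict.mk level_by_id).getD · 0) node_ids,
      b_side ((PySem.Dict.mk level_by_id).getD · 0) node_ids]
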